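-- pv_equiv track=rewrite | github.com/liuhz0926/algorithm_practicing_progress | Two_Pointers/1219/1219_高频班_0115.py | can_heat_all
-- ===== SOURCE A (Python) =====
-- def can_heat_all(houses, heaters, k):
--     for house in houses:
--         can_heat = False
--         for heater in heaters:
--             # house和heater之间小于等于k，可以加热
--             if abs(heater - house) <= k:
--                 can_heat = True
--                 break
--         # 这个house无法加热直接返回
--         if not can_heat:
--             return False
--     # 全都可以
--     return True
-- ===== SOURCE B (Python) =====
-- def can_heat_all(houses, heaters, k):
--     hs = sorted(heaters)
--     n = len(hs)
--     for x in houses: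
--         lo, hi = 0, n
--         while lo < hi:
--             mid = (lo + hi) // 2
--             if hs[mid] < x:
--                 lo = mid + 1
--             else:
--                 hi = mid
--         if not ((lo < n and hs[lo] - x <= k) or (lo > 0 and x - hs[lo - 1] <= k)):
--             return False
--     return True
-- ===== Notes on version B (the rewrite author's own statement) =====
-- stated objective: faster
-- what changed: B sorts the heaters once and binary-searches each house's insertion point, checking only the two neighbouring heaters, instead of A's linear scan of all heaters per house.
import Mathlib
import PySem

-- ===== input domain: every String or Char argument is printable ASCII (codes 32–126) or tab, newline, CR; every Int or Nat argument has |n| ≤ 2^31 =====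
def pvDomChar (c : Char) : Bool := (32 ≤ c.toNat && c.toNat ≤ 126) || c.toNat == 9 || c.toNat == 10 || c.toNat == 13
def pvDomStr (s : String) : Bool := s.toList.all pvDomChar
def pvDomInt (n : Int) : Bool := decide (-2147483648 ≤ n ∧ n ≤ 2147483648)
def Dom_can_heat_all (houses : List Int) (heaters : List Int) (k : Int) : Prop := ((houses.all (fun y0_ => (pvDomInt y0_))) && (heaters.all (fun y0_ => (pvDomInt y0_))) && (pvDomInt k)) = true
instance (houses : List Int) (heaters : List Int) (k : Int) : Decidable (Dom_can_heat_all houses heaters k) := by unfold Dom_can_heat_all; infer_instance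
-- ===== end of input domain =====

-- B sorts the heaters once and binary-searches the nearest heater per house
-- (O((H+M) log M) instead of A's O(H·M) nested scan); return values are equal.

-- ===== PORT A =====
-- inner `for heater in heaters` loop: can_heat becomes True iff some heater is within k
def heatInner (house : Int) (k : Int) : List Int → Bool
  | [] => false
  | heater :: rest => if |heater - house| ≤ k then true else heatInner house k rest

-- outer `for house in houses` loop: returns False at the first unheatable house
def heatOuter (heaters : List Int) (k : Int) : List Int → Bool
  | [] => true
  | house :: rest => if !(heatInner house k heaters) then false else heatOuter heaters k rest

def can_heat_all (houses : List Int) (heaters : List Int) (k : Int) : Bool :=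
  heatOuter heaters k houses

-- ===== PORT B =====
-- the `while lo < hi` binary-search loop of Source B (hs[mid] is always in range there;
-- getD 0 is the safe read)
-- fuel-based totalization of the while loop (hi - lo shrinks every iteration,
-- so fuel = initial hi suffices)
def blLoop (hs : List Int) (x : Int) : Nat → Nat → Nat → Nat
  | 0, lo, _ => lo
  | fuel + 1, lo, hi =>
    if lo < hi then
      let mid := (lo + hi) / 2
      if hs.getD mid 0 < x then blLoop hs x fuel (mid + 1) hi else blLoop hs x fuel lo mid
    else lo

-- the per-house body of Source B's loop: binary search, then check the two neighbours
def nearB (hs : List Int) (k : Int) (x : Int) : Bool :=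
  let n := hs.length
  let lo := blLoop hs x n 0 n
  (decide (lo < n) && decide (hs.getD lo 0 - x ≤ k)) ||
  (decide (0 < lo) && decide (x - hs.getD (lo - 1) 0 ≤ k))

def can_heat_all_alt (houses : List Int) (heaters : List Int) (k : Int) : Bool :=
  let hs := PySem.List.sorted heaters (fun h => h) false
  houses.all (fun x => nearB hs k x)

-- ===== PRECONDITION & SPEC =====
def Spec_can_heat_all (houses : List Int) (heaters : List Int) (k : Int) (out : Bool) : Prop := out = can_heat_all_alt houses heaters k
instance (houses : List Int) (heaters : List Int) (k : Int) (out : Bool) : Decidable (Spec_can_heat_all houses heaters k out) := by unfold Spec_can_heat_all; infer_instance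

-- ===== CLAIM (what is proved, stated in full; the proofs are below) =====
def Claim_equal_can_heat_all : Prop := ∀ (houses : List Int) (heaters : List Int) (k : Int), Dom_can_heat_all houses heaters k → Spec_can_heat_all houses heaters k (can_heat_all houses heaters k)

-- ===== LEMMAS AND PROOFS =====

-- A's inner loop is an `any`
theorem heatInner_eq_any (house k : Int) (hs : List Int) :
    heatInner house k hs = hs.any (fun h => decide (|h - house| ≤ k)) := by
  induction hs with
  | nil => rfl
  | cons a t ih => by_cases h : |a - house| ≤ k <;> simp [heatInner, h, ih]

-- A's outer loop is an `all` of the inner `any`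
theorem heatOuter_eq_all (heaters : List Int) (k : Int) (houses : List Int) :
    heatOuter heaters k houses
      = houses.all (fun x => heaters.any (fun h => decide (|h - x| ≤ k))) := by
  induction houses with
  | nil => rfl
  | cons a t ih =>
    show (if !(heatInner a k heaters) then false else heatOuter heaters k t) = _
    rw [heatInner_eq_any, ih]
    cases hany : heaters.any (fun h => decide (|h - a| ≤ k)) <;> simp [hany]

-- binary-search invariant: on a sorted list blLoop returns the least index whose
-- element is ≥ x, within [lo, hi]
theorem blLoop_spec (hs : List Int) (x : Int)
    (hsort : hs.Pairwise (· ≤ ·)) :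
    ∀ n lo hi, hi - lo ≤ n → hi ≤ hs.length → lo ≤ hi →
    (∀ i, i < lo → hs.getD i 0 < x) →
    (∀ i, hi ≤ i → i < hs.length → x ≤ hs.getD i 0) →
    lo ≤ blLoop hs x n lo hi ∧ blLoop hs x n lo hi ≤ hi ∧
    (∀ i, i < blLoop hs x n lo hi → hs.getD i 0 < x) ∧
    (∀ i, blLoop hs x n lo hi ≤ i → i < hs.length → x ≤ hs.getD i 0) := by
  have hmono : ∀ i j, i ≤ j → j < hs.length → hs.getD i 0 ≤ hs.getD j 0 := by
    intro i j hij hj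
    rcases Nat.eq_or_lt_of_le hij with rfl | hlt
    · exact le_refl _
    · rw [List.getD_eq_getElem _ _ (lt_trans hlt hj), List.getD_eq_getElem _ _ hj]
      exact List.pairwise_iff_getElem.mp hsort i j _ _ hlt
  intro n
  induction n with
  | zero =>
    intro lo hi hfuel hhi hlohi hbelow habove
    have hhl : lo = hi := by omega
    subst hhl
    simp only [blLoop]
    exact ⟨le_refl _, hlohi, hbelow, fun i hi2 h2 => habove i (by omega) h2⟩
  | succ n ih =>
    intro lo hi hfuel hhi hlohi hbelow habove
    simp only [blLoop]
    by_cases hlt : lo < hi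
    · simp only [hlt, if_pos]
      by_cases hmid : hs.getD ((lo + hi) / 2) 0 < x
      · rw [if_pos hmid]
        have := ih ((lo + hi) / 2 + 1) hi (by omega) hhi (by omega)
          (fun i hi2 => lt_of_le_of_lt (hmono i ((lo + hi) / 2) (by omega) (by omega)) hmid)
          habove
        exact ⟨by omega, this.2.1, this.2.2.1, this.2.2.2⟩
      · rw [if_neg hmid]
        have habove' : ∀ i, (lo + hi) / 2 ≤ i → i < hs.length → x ≤ hs.getD i 0 := by
          intro i hge hlen
          exact le_trans (not_lt.mp hmid) (hmono ((lo + hi) / 2) i hge hlen)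
        have := ih lo ((lo + hi) / 2) (by omega) (by omega) (by omega) hbelow habove'
        exact ⟨this.1, by omega, this.2.2.1, this.2.2.2⟩
    · simp only [hlt, if_neg, not_false_iff]
      exact ⟨le_refl _, hlohi, hbelow, fun i hi2 h2 => habove i (by omega) h2⟩

-- on a sorted list, the neighbour check after the binary search decides "some element within k"
theorem nearB_eq_any (hs : List Int) (k x : Int) (hsort : hs.Pairwise (· ≤ ·)) :
    nearB hs k x = hs.any (fun h => decide (|h - x| ≤ k)) := by
  have hspec := blLoop_spec hs x hsort hs.length 0 hs.length (by omega) (le_refl _)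
    (Nat.zero_le _) (fun i hi => absurd hi (Nat.not_lt_zero i))
    (fun i hge hlt => absurd hlt (by omega))
  have hmono : ∀ i j, i ≤ j → j < hs.length → hs.getD i 0 ≤ hs.getD j 0 := by
    intro i j hij hj
    rcases Nat.eq_or_lt_of_le hij with rfl | hlt
    · exact le_refl _
    · rw [List.getD_eq_getElem _ _ (lt_trans hlt hj), List.getD_eq_getElem _ _ hj]
      exact List.pairwise_iff_getElem.mp hsort i j _ _ hlt
  set lo := blLoop hs x hs.length 0 hs.length with hlo
  obtain ⟨-, hle, hbelow, habove⟩ := hspec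
  apply Bool.eq_iff_iff.mpr
  simp only [nearB]
  rw [← hlo]
  simp only [List.any_eq_true, Bool.or_eq_true, Bool.and_eq_true, decide_eq_true_eq]
  constructor
  · rintro (⟨hlt, hnear⟩ | ⟨hpos, hnear⟩)
    · refine ⟨hs.getD lo 0, ?_, ?_⟩
      · rw [List.getD_eq_getElem _ _ hlt]; exact List.getElem_mem hlt
      · have := habove lo (le_refl _) hlt
        rw [abs_sub_le_iff]; constructor <;> omega
    · have hlt' : lo - 1 < hs.length := by omega
      refine ⟨hs.getD (lo - 1) 0, ?_, ?_⟩
      · rw [List.getD_eq_getElem _ _ hlt']; exact List.getElem_mem hlt'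
      · have := hbelow (lo - 1) (by omega)
        rw [abs_sub_le_iff]; constructor <;> omega
  · rintro ⟨h, hmem, hnear⟩
    obtain ⟨j, hj, rfl⟩ := List.getElem_of_mem hmem
    rw [abs_sub_le_iff] at hnear
    have hgj : hs[j] = hs.getD j 0 := (List.getD_eq_getElem _ _ hj).symm
    by_cases hord : x ≤ hs[j]
    · left
      have hjlo : lo ≤ j := by
        by_contra hc
        have := hbelow j (by omega)
        omega
      have h1 : hs.getD lo 0 ≤ hs.getD j 0 := hmono lo j hjlo hj
      have h2 := habove lo (le_refl _) (by omega)
      exact ⟨by omega, by omega⟩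
    · right
      have hjlo : j < lo := by
        by_contra hc
        have := habove j (by omega) hj
        omega
      have h1 : hs.getD j 0 ≤ hs.getD (lo - 1) 0 := hmono j (lo - 1) (by omega) (by omega)
      have h2 := hbelow (lo - 1) (by omega)
      exact ⟨by omega, by omega⟩

-- `any` is invariant under the sorting permutation
theorem any_sorted (heaters : List Int) (f : Int → Bool) :
    (PySem.List.sorted heaters (fun h => h) false).any f = heaters.any f := by
  apply Bool.eq_iff_iff.mpr
  simp [List.any_eq_true, PySem.List.mem_sorted]

-- ===== VERDICT (by name: the statement is the Claim_ definition above) =====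
theorem can_heat_all_spec : Claim_equal_can_heat_all := by
  intro houses heaters k _
  unfold Spec_can_heat_all can_heat_all can_heat_all_alt
  rw [heatOuter_eq_all]
  congr 1
  funext x
  rw [nearB_eq_any _ _ _ (PySem.List.sorted_pairwise heaters (fun h => h)),
    any_sorted]
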